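-- pv_equiv track=rewrite | github.com/jongrall/just-landed | utils.py | sanitize_flight_number
-- ===== SOURCE A (Python) =====
-- def sanitize_flight_number(f_num):
--     """Cleans up a flight number - strips leading zeros from flight number, extra
--     spaces, uppercases everything, performs some IATA to ICAO code translation.
--
--     """
--     f_num = f_num.upper().replace(' ', '')
--     chars = []
--     strip = True
--     for char in f_num:
--         if strip and char.isdigit():
--             if int(char) == 0:
--                 continue
--             else:
--                 strip = False
--         chars.append(char)
--     return ''.join(chars)
-- ===== SOURCE B (Python) =====
-- def sanitize_flight_number(f_num):
--     f_num = f_num.upper().replace(' ', '')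
--     split = len(f_num)
--     for i, char in enumerate(f_num):
--         if char.isdigit() and int(char) != 0:
--             split = i
--             break
--     return ''.join(c for c in f_num[:split] if not c.isdigit()) + f_num[split:]
-- ===== Notes on version B (the rewrite author's own statement) =====
-- stated objective: alternative
-- what changed: Replaces A's single stateful loop with a strip flag by a two-phase computation: find the index of the first significant (nonzero) digit, then filter digits out of the prefix and concatenate the untouched suffix.
import Mathlib
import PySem

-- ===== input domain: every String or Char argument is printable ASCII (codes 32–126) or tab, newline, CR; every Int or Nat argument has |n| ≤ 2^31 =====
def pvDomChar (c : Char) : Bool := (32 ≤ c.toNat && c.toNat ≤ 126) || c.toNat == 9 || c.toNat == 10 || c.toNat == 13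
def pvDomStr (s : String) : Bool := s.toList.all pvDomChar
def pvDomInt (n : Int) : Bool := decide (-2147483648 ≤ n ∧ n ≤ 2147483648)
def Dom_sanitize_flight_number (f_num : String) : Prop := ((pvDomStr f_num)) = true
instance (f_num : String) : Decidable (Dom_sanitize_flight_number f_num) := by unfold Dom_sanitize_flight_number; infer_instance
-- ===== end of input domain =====

-- B re-decomposes A's stateful strip loop into: find the first nonzero digit, filter digits from the prefix, keep the suffix (alternative decomposition, same cost).

-- ===== PORT A =====
-- the for-loop with its `strip` flag; `int(char) == 0` ported as `c == '0'`, exact on the ASCII digits isdigit selects inside Dom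
def sanitizeLoopA : Bool → List Char → List Char
  | _, [] => []
  | strip, c :: cs =>
    if strip && PySem.Chars.isdigit c then
      if c == '0' then sanitizeLoopA strip cs
      else c :: sanitizeLoopA false cs
    else c :: sanitizeLoopA strip cs

def sanitize_flight_number (f_num : String) : String :=
  String.ofList (sanitizeLoopA true (PySem.Str.replace (PySem.Str.upper f_num) " " "").toList)

-- ===== PORT B =====
-- index of the first significant digit (= length if none), as B's enumerate/break loop computes it
def findSplitB : List Char → Nat
  | [] => 0
  | c :: cs => if PySem.Chars.isdigit c && !(c == '0') then 0 else findSplitB cs + 1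

def sanitize_flight_number_alt (f_num : String) : String :=
  let l := (PySem.Str.replace (PySem.Str.upper f_num) " " "").toList
  let split := findSplitB l
  String.ofList ((l.take split).filter (fun c => !PySem.Chars.isdigit c) ++ l.drop split)

-- ===== PRECONDITION & SPEC =====
def Spec_sanitize_flight_number (f_num : String) (out : String) : Prop := out = sanitize_flight_number_alt f_num
instance (f_num : String) (out : String) : Decidable (Spec_sanitize_flight_number f_num out) := by unfold Spec_sanitize_flight_number; infer_instance

-- ===== CLAIM (what is proved, stated in full; the proofs are below) =====
def Claim_equal_sanitize_flight_number : Prop := ∀ (f_num : String), Dom_sanitize_flight_number f_num → Spec_sanitize_flight_number f_num (sanitize_flight_number f_num)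

-- ===== LEMMAS AND PROOFS =====
theorem sanitizeLoopA_false (l : List Char) : sanitizeLoopA false l = l := by
  induction l with
  | nil => rfl
  | cons c cs ih => simp [sanitizeLoopA, ih]

theorem sanitizeLoopA_eq (l : List Char) :
    sanitizeLoopA true l =
      (l.take (findSplitB l)).filter (fun c => !PySem.Chars.isdigit c) ++ l.drop (findSplitB l) := by
  induction l with
  | nil => rfl
  | cons c cs ih =>
    by_cases hd : PySem.Chars.isdigit c = true
    · by_cases hz : c = '0'
      · subst hz
        simp [sanitizeLoopA, findSplitB, hd, ih]
      · simp [sanitizeLoopA, findSplitB, hd, hz, sanitizeLoopA_false]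
    · simp [sanitizeLoopA, findSplitB, hd, ih]

-- ===== VERDICT (by name: the statement is the Claim_ definition above) =====
theorem sanitize_flight_number_spec : Claim_equal_sanitize_flight_number := by
  intro f_num _
  unfold Spec_sanitize_flight_number sanitize_flight_number sanitize_flight_number_alt
  simp [sanitizeLoopA_eq]
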